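-- pv_equiv track=rewrite | github.com/karlwelzel/ar3-matlab | experiments/GeneratingPlots/wandb_tools.py | split_config
-- ===== SOURCE A (Python) =====
-- from typing import Any, Callable, Literal
--
-- def split_config(
--     config: dict[str, Any],
--     method_parameters: list[str],
--     ignore: list[str] = [],
-- ) -> tuple[dict[str, Any], dict[str, Any]]:
--     method_config = dict()
--     problem_setup_config = dict()
--     for key, value in config.items():
--         if key in method_parameters:
--             method_config[key] = value
--         elif key in ignore:
--             pass
--         else:
--             problem_setup_config[key] = value
--
--     return method_config, problem_setup_config
-- ===== SOURCE B (Python) =====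
-- def split_config(
--     config,
--     method_parameters,
--     ignore=[],
-- ):
--     mp = set(method_parameters)
--     method_config = {k: v for k, v in config.items() if k in mp}
--     problem_setup_config = dict(config)
--     for k in method_parameters:
--         problem_setup_config.pop(k, None)
--     for k in ignore:
--         problem_setup_config.pop(k, None)
--     return method_config, problem_setup_config
-- ===== Notes on version B (the rewrite author's own statement) =====
-- stated objective: faster
-- what changed: A builds both dicts in one loop with a three-way branch and per-key list scans; B builds method_config by a set-membership filter and builds problem_setup_config subtractively: copy config, then pop every method/ignore key by traversing the parameter lists, so the inner list scans disappear.
import Mathlib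
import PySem

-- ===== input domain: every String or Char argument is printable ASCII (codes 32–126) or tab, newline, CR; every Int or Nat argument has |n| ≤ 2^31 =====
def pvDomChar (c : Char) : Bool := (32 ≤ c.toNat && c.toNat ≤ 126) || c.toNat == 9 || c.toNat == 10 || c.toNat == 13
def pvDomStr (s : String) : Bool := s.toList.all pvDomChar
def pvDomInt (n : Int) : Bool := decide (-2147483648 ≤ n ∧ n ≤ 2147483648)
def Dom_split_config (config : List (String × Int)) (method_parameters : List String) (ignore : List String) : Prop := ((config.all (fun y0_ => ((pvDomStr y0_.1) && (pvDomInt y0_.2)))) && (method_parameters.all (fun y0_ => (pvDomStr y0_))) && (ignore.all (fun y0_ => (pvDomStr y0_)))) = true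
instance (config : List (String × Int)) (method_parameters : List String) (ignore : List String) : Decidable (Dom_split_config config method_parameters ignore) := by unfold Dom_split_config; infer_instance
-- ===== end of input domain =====

-- B replaces A's single three-way-branch loop (with per-key list scans) by a set-membership
-- filter for method_config and a subtractive build of problem_setup_config (copy config,
-- then pop each method/ignore key by traversing those lists). Return values only.

-- ===== PORT A =====
-- A: one loop over config.items() building two dicts with a three-way branch.
def split_config (config : List (String × Int)) (method_parameters : List String) (ignore : List String) : (List (String × Int)) × (List (String × Int)) :=
  let r := config.foldl
    (fun (acc : PySem.Dict String Int × PySem.Dict String Int) kv =>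
      if method_parameters.contains kv.1 then (acc.1.insert kv.1 kv.2, acc.2)
      else if ignore.contains kv.1 then acc
      else (acc.1, acc.2.insert kv.1 kv.2))
    (PySem.Dict.empty, PySem.Dict.empty)
  (r.1.items, r.2.items)

-- ===== PORT B =====
-- B: set-membership filter for method_config; problem_setup_config = dict(config) with
-- every method_parameters / ignore key popped (pop with default = Dict.erase).
def split_config_alt (config : List (String × Int)) (method_parameters : List String) (ignore : List String) : (List (String × Int)) × (List (String × Int)) :=
  let mp : PySem.Set String := PySem.Set.ofList method_parameters
  let method_config := config.filter (fun kv => mp.contains kv.1)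
  let psc0 := config.foldl (fun (d : PySem.Dict String Int) kv => d.insert kv.1 kv.2) PySem.Dict.empty
  let psc1 := method_parameters.foldl (fun (d : PySem.Dict String Int) k => d.erase k) psc0
  let psc2 := ignore.foldl (fun (d : PySem.Dict String Int) k => d.erase k) psc1
  (method_config, psc2.items)

-- ===== PRECONDITION & SPEC =====
-- Pre_ excludes config lists with duplicate keys: a Python dict cannot contain them, so they
-- do not correspond to any input A actually accepts.
def Pre_split_config (config : List (String × Int)) (method_parameters : List String) (ignore : List String) : Prop :=
  (config.map Prod.fst).Nodup
instance (config : List (String × Int)) (method_parameters : List String) (ignore : List String) : Decidable (Pre_split_config config method_parameters ignore) := by unfold Pre_split_config; infer_instance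
def pvWitness_split_config : (List (String × Int)) × List String × List String :=
  ([("a", 1), ("b", 2), ("c", 3)], ["a", "x"], ["b"])

def Spec_split_config (config : List (String × Int)) (method_parameters : List String) (ignore : List String) (out : (List (String × Int)) × (List (String × Int))) : Prop := out = split_config_alt config method_parameters ignore
instance (config : List (String × Int)) (method_parameters : List String) (ignore : List String) (out : (List (String × Int)) × (List (String × Int))) : Decidable (Spec_split_config config method_parameters ignore out) := by unfold Spec_split_config; infer_instance

-- ===== CLAIM =====
def Claim_equal_split_config : Prop := ∀ (config : List (String × Int)) (method_parameters : List String) (ignore : List String), Dom_split_config config method_parameters ignore → Pre_split_config config method_parameters ignore → Spec_split_config config method_parameters ignore (split_config config method_parameters ignore)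

-- ===== LEMMAS AND PROOFS =====

-- Invariant for A's loop: as long as every remaining key is fresh for both accumulators,
-- the loop appends exactly the two membership filters to the accumulators' item lists.
theorem split_config_loop_items (method_parameters ignore : List String)
    (config : List (String × Int)) (d1 d2 : PySem.Dict String Int)
    (hnd : (config.map Prod.fst).Nodup)
    (hfresh : ∀ kv ∈ config, d1.contains kv.1 = false ∧ d2.contains kv.1 = false) :
    (config.foldl
      (fun (acc : PySem.Dict String Int × PySem.Dict String Int) kv =>
        if method_parameters.contains kv.1 then (acc.1.insert kv.1 kv.2, acc.2)
        else if ignore.contains kv.1 then acc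
        else (acc.1, acc.2.insert kv.1 kv.2)) (d1, d2)).1.items
      = d1.items ++ config.filter (fun kv => method_parameters.contains kv.1) ∧
    (config.foldl
      (fun (acc : PySem.Dict String Int × PySem.Dict String Int) kv =>
        if method_parameters.contains kv.1 then (acc.1.insert kv.1 kv.2, acc.2)
        else if ignore.contains kv.1 then acc
        else (acc.1, acc.2.insert kv.1 kv.2)) (d1, d2)).2.items
      = d2.items ++ config.filter (fun kv => !method_parameters.contains kv.1 && !ignore.contains kv.1) := by
  induction config generalizing d1 d2 with
  | nil => simp
  | cons kv rest ih =>
    simp only [List.map_cons, List.nodup_cons] at hnd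
    obtain ⟨hk, hnd'⟩ := hnd
    obtain ⟨h1, h2⟩ := hfresh kv (List.mem_cons_self ..)
    have hfresh' : ∀ p, (p ∈ rest → d1.contains p.1 = false ∧ d2.contains p.1 = false) := by
      intro p hp; exact hfresh p (List.mem_cons_of_mem _ hp)
    have hkne : ∀ p ∈ rest, p.1 ≠ kv.1 := by
      intro p hp heq
      exact hk (heq ▸ List.mem_map_of_mem hp)
    rw [List.foldl_cons, List.filter_cons, List.filter_cons]
    cases hm : method_parameters.contains kv.1 with
    | true =>
      have := ih (d1.insert kv.1 kv.2) d2 hnd' (by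
        intro p hp
        refine ⟨?_, (hfresh' p hp).2⟩
        rw [PySem.Dict.contains_insert]
        simp [hkne p hp, (hfresh' p hp).1])
      simp only [Bool.not_true, Bool.false_and, reduceIte]
      rw [this.1, this.2, PySem.Dict.items_insert_of_not_contains _ _ h1]
      simp
    | false =>
      cases hi : ignore.contains kv.1 with
      | true =>
        have := ih d1 d2 hnd' hfresh'
        simp only [Bool.not_true, Bool.not_false, Bool.true_and, Bool.false_eq_true, if_false, reduceIte]
        exact ⟨this.1, this.2⟩
      | false =>
        have := ih d1 (d2.insert kv.1 kv.2) hnd' (by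
          intro p hp
          refine ⟨(hfresh' p hp).1, ?_⟩
          rw [PySem.Dict.contains_insert]
          simp [hkne p hp, (hfresh' p hp).2])
        simp only [Bool.not_false, Bool.true_and, Bool.false_eq_true, if_false, reduceIte]
        rw [this.1, this.2, PySem.Dict.items_insert_of_not_contains _ _ h2]
        simp

-- A fold of Dict.erase over a key list filters the items by non-membership of that list.
theorem items_foldl_erase (ks : List String) (d : PySem.Dict String Int) :
    (ks.foldl (fun (d : PySem.Dict String Int) k => d.erase k) d).items
      = d.items.filter (fun p => !ks.contains p.1) := by
  induction ks generalizing d with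
  | nil => simp
  | cons k ks ih =>
    rw [List.foldl_cons, ih]
    show (PySem.Dict.items (d.erase k)).filter _ = _
    simp only [PySem.Dict.erase, List.filter_filter]
    apply List.filter_congr
    intro p _
    cases h1 : (p.1 == k) <;> cases h2 : ks.contains p.1 <;>
      simp only [List.contains_cons, h1, h2, Bool.not_true, Bool.not_false,
        Bool.and_true, Bool.and_false, Bool.true_or, Bool.false_or, Bool.or_true, Bool.or_false]

-- ===== VERDICT =====
theorem split_config_spec : Claim_equal_split_config := by
  intro config method_parameters ignore _ hpre
  unfold Spec_split_config split_config split_config_alt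
  have hA := split_config_loop_items method_parameters ignore config
    PySem.Dict.empty PySem.Dict.empty hpre (by intro kv _; simp [PySem.Dict.contains_empty])
  simp only []
  rw [hA.1, hA.2]
  have hcopy : (config.foldl (fun (d : PySem.Dict String Int) kv => d.insert kv.1 kv.2)
      PySem.Dict.empty).items = config := by
    have := PySem.Dict.items_foldl_insert_fresh (d := (PySem.Dict.empty : PySem.Dict String Int))
      (l := config) (k := Prod.fst) (v := Prod.snd)
      (by intro a _; simp [PySem.Dict.contains_empty]) hpre
    simpa using this
  rw [items_foldl_erase, items_foldl_erase, hcopy, List.filter_filter]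
  simp only [PySem.Dict.empty, List.nil_append, Prod.mk.injEq]
  constructor
  · apply List.filter_congr
    intro p _
    simp [PySem.Set.mem_ofList]
  · apply List.filter_congr
    intro p _
    exact Bool.and_comm _ _
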